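-- pv_equiv track=rewrite | github.com/AlpKaraagac/Thesis-MotivationalLLM | src/discoverllm/parsers/common.py | _balanced_slice
-- ===== SOURCE A (Python) =====
-- def _balanced_slice(text: str, start_index: int) -> str | None:
--     opener = text[start_index]
--     closer = "}" if opener == "{" else "]"
--     stack: list[str] = [closer]
--     in_string = False
--     escape = False
--     quote_char = ""
--
--     for index in range(start_index + 1, len(text)):
--         char = text[index]
--         if in_string:
--             if escape:
--                 escape = False
--                 continue
--             if char == "\\":
--                 escape = True
--                 continue
--             if char == quote_char:
--                 in_string = False
--             continue
--
--         if char in ('"', "'"):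
--             in_string = True
--             quote_char = char
--             continue
--
--         if char == "{":
--             stack.append("}")
--             continue
--         if char == "[":
--             stack.append("]")
--             continue
--         if char in ("}", "]"):
--             if not stack or char != stack[-1]:
--                 return None
--             stack.pop()
--             if not stack:
--                 return text[start_index : index + 1].strip()
--     return None
-- ===== SOURCE B (Python) =====
-- def _balanced_slice(text: str, start_index: int) -> str | None:
--     opener = text[start_index]
--     closer = "}" if opener == "{" else "]"
--
--     # Stage 1: extract the structural bracket tokens (brackets outside string
--     # literals), forgetting everything else about the text.
--     toks = []
--     in_string = False
--     escape = False
--     quote = ""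
--     for idx in range(start_index + 1, len(text)):
--         ch = text[idx]
--         if in_string:
--             if escape:
--                 escape = False
--             elif ch == "\\":
--                 escape = True
--             elif ch == quote:
--                 in_string = False
--         elif ch in ('"', "'"):
--             in_string = True
--             quote = ch
--         elif ch in "{[}]":
--             toks.append((idx, ch))
--
--     # Stage 2: match brackets over the token list alone; the current expected
--     # closer is held apart from the list of outer pending closers.
--     top = closer
--     pending = []
--     for idx, ch in toks:
--         if ch == "{" or ch == "[":
--             pending.append(top)
--             top = "}" if ch == "{" else "]"
--         elif ch != top:
--             return None
--         elif pending:
--             top = pending.pop()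
--         else:
--             return text[start_index: idx + 1].strip()
--     return None
-- ===== Notes on version B (the rewrite author's own statement) =====
-- stated objective: alternative
-- what changed: A's single pass interleaving string-literal state with an explicit stack of expected closers is split into two staged passes: a tokenizer that extracts the bracket tokens outside string literals, then a matcher over the token list alone that holds the current expected closer apart from the pending outer closers.
import Mathlib
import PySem

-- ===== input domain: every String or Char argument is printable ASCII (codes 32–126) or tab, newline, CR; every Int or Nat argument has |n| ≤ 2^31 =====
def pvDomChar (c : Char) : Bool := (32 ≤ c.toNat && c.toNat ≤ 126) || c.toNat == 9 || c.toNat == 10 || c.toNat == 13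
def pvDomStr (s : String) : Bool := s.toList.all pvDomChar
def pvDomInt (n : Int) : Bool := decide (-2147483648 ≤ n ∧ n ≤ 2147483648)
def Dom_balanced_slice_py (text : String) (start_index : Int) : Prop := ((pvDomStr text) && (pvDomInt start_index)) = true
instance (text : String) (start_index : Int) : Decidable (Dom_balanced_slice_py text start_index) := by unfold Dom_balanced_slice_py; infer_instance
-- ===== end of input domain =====

-- B replaces A's single stack-driven scan by two staged passes: first extract the
-- bracket tokens outside string literals, then match brackets over the token list
-- alone (objective: alternative decomposition, same O(n) cost).

-- text[i] inside the loops: every index the loops read is in range (Python's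
-- range guarantees it), so the default is never used; A's only possible
-- IndexError is text[start_index], excluded by Pre_.
def pvCharAt (cs : List Char) (i : Int) : Char := (PySem.List.pyGet? cs i).getD ' '

-- ===== PORT A =====
-- A's for-loop: fuel = number of remaining indices, i the current index.
def pvLoopA (cs : List Char) (start : Int) (stack : List Char)
    (inS esc : Bool) (q : Char) (i : Int) : Nat → Option String
  | 0 => none
  | fuel + 1 =>
    let char := pvCharAt cs i
    if inS then
      if esc then pvLoopA cs start stack true false q (i + 1) fuel
      else if char = '\\' then pvLoopA cs start stack true true q (i + 1) fuel
      else if char = q then pvLoopA cs start stack false esc q (i + 1) fuel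
      else pvLoopA cs start stack true esc q (i + 1) fuel
    else if char = '"' ∨ char = '\'' then pvLoopA cs start stack true esc char (i + 1) fuel
    else if char = '{' then pvLoopA cs start ('}' :: stack) inS esc q (i + 1) fuel
    else if char = '[' then pvLoopA cs start (']' :: stack) inS esc q (i + 1) fuel
    else if char = '}' ∨ char = ']' then
      match stack with
      | [] => none
      | top :: rest =>
        if char ≠ top then none
        else if rest = [] then
          some (String.ofList (PySem.Chars.strip (PySem.List.slice cs (some start) (some (i + 1)))))
        else pvLoopA cs start rest inS esc q (i + 1) fuel
    else pvLoopA cs start stack inS esc q (i + 1) fuel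

def balanced_slice_py (text : String) (start_index : Int) : Option String :=
  let cs := text.toList
  match PySem.List.pyGet? cs start_index with
  | none => none   -- IndexError on text[start_index]: excluded by Pre_
  | some opener =>
    let closer := if opener = '{' then '}' else ']'
    pvLoopA cs start_index [closer] false false ' ' (start_index + 1)
      (((cs.length : Int) - (start_index + 1)).toNat)

-- ===== PORT B =====
-- Source B stage 1: collect (index, bracket) tokens outside string literals.
def pvTokensB (cs : List Char) (inS esc : Bool) (q : Char) (i : Int) : Nat → List (Int × Char)
  | 0 => []
  | fuel + 1 =>
    let ch := pvCharAt cs i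
    if inS then
      if esc then pvTokensB cs true false q (i + 1) fuel
      else if ch = '\\' then pvTokensB cs true true q (i + 1) fuel
      else if ch = q then pvTokensB cs false esc q (i + 1) fuel
      else pvTokensB cs true esc q (i + 1) fuel
    else if ch = '"' ∨ ch = '\'' then pvTokensB cs true esc ch (i + 1) fuel
    else if ch = '{' ∨ ch = '[' ∨ ch = '}' ∨ ch = ']' then
      (i, ch) :: pvTokensB cs inS esc q (i + 1) fuel
    else pvTokensB cs inS esc q (i + 1) fuel

-- Source B stage 2: match over the token list; `top` is the expected closer,
-- `pending` the outer pending closers (Source B's list, last element first).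
def pvMatchB (cs : List Char) (start : Int) (top : Char) (pending : List Char) :
    List (Int × Char) → Option String
  | [] => none
  | (idx, ch) :: rest =>
    if ch = '{' ∨ ch = '[' then
      pvMatchB cs start (if ch = '{' then '}' else ']') (top :: pending) rest
    else if ch ≠ top then none
    else
      match pending with
      | p :: ps => pvMatchB cs start p ps rest
      | [] => some (String.ofList (PySem.Chars.strip (PySem.List.slice cs (some start) (some (idx + 1)))))

def balanced_slice_py_alt (text : String) (start_index : Int) : Option String :=
  let cs := text.toList
  match PySem.List.pyGet? cs start_index with
  | none => none   -- IndexError on text[start_index]: excluded by Pre_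
  | some opener =>
    let closer := if opener = '{' then '}' else ']'
    pvMatchB cs start_index closer []
      (pvTokensB cs false false ' ' (start_index + 1)
        (((cs.length : Int) - (start_index + 1)).toNat))

-- ===== PRECONDITION & SPEC =====
-- Exactly where the Python A returns normally: text[start_index] must not raise IndexError.
def Pre_balanced_slice_py (text : String) (start_index : Int) : Prop :=
  PySem.Raise.InRange text.toList.length start_index
instance (text : String) (start_index : Int) : Decidable (Pre_balanced_slice_py text start_index) := by
  unfold Pre_balanced_slice_py; infer_instance
def pvWitness_balanced_slice_py : String × Int := ("{\"a\": [1]}", 0)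

def Spec_balanced_slice_py (text : String) (start_index : Int) (out : Option String) : Prop := out = balanced_slice_py_alt text start_index
instance (text : String) (start_index : Int) (out : Option String) : Decidable (Spec_balanced_slice_py text start_index out) := by unfold Spec_balanced_slice_py; infer_instance

-- ===== CLAIM (what is proved, stated in full; the proofs are below) =====
def Claim_equal_balanced_slice_py : Prop := ∀ (text : String) (start_index : Int), Dom_balanced_slice_py text start_index → Pre_balanced_slice_py text start_index → Spec_balanced_slice_py text start_index (balanced_slice_py text start_index)

-- ===== LEMMAS AND PROOFS =====

-- Lockstep invariant: A's loop with stack top::pending equals B's matcher run on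
-- the tokens B's first pass extracts from the same position and string state.
lemma pvLoopA_eq_matchB (cs : List Char) (start : Int) (fuel : Nat) :
    ∀ (top : Char) (pending : List Char) (inS esc : Bool) (q : Char) (i : Int),
      pvLoopA cs start (top :: pending) inS esc q i fuel =
        pvMatchB cs start top pending (pvTokensB cs inS esc q i fuel) := by
  induction fuel with
  | zero => intro top pending inS esc q i; rfl
  | succ f ih =>
    intro top pending inS esc q i
    rw [pvLoopA, pvTokensB]
    cases inS with
    | true =>
      simp only [if_true]
      cases esc with
      | true => exact ih top pending true false q (i + 1)
      | false =>
        by_cases h1 : pvCharAt cs i = '\\'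
        · simp only [if_pos h1]; exact ih top pending true true q (i + 1)
        · simp only [if_neg h1]
          by_cases h2 : pvCharAt cs i = q
          · simp only [if_pos h2]; exact ih top pending false false q (i + 1)
          · simp only [if_neg h2]; exact ih top pending true false q (i + 1)
    | false =>
      simp only [Bool.false_eq_true, if_false]
      by_cases hq : pvCharAt cs i = '"' ∨ pvCharAt cs i = '\''
      · simp only [if_pos hq]; exact ih top pending true esc (pvCharAt cs i) (i + 1)
      · simp only [if_neg hq]
        by_cases hb1 : pvCharAt cs i = '{'
        · simp only [if_pos hb1, if_pos (by exact Or.inl hb1 : pvCharAt cs i = '{' ∨ pvCharAt cs i = '[' ∨ pvCharAt cs i = '}' ∨ pvCharAt cs i = ']')]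
          rw [pvMatchB.eq_def]
          simp only [if_pos (Or.inl hb1), if_pos hb1]
          exact ih '}' (top :: pending) false esc q (i + 1)
        · simp only [if_neg hb1]
          by_cases hb2 : pvCharAt cs i = '['
          · simp only [if_pos hb2, if_pos (by exact Or.inr (Or.inl hb2) : pvCharAt cs i = '{' ∨ pvCharAt cs i = '[' ∨ pvCharAt cs i = '}' ∨ pvCharAt cs i = ']')]
            rw [pvMatchB.eq_def]
            simp only [if_pos (Or.inr hb2 : pvCharAt cs i = '{' ∨ pvCharAt cs i = '['), if_neg hb1]
            exact ih ']' (top :: pending) false esc q (i + 1)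
          · simp only [if_neg hb2]
            by_cases hcl : pvCharAt cs i = '}' ∨ pvCharAt cs i = ']'
            · have htk : pvCharAt cs i = '{' ∨ pvCharAt cs i = '[' ∨ pvCharAt cs i = '}' ∨ pvCharAt cs i = ']' := by tauto
              simp only [if_pos hcl, if_pos htk]
              rw [pvMatchB.eq_def]
              simp only [if_neg (by tauto : ¬(pvCharAt cs i = '{' ∨ pvCharAt cs i = '['))]
              by_cases ht : pvCharAt cs i = top
              · simp only [ht, ne_eq, not_true_eq_false, if_false]
                cases pending with
                | nil => rfl
                | cons p ps =>
                  simp only [if_neg (List.cons_ne_nil p ps)]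
                  exact ih p ps false esc q (i + 1)
              · simp [ht]
            · have htk : ¬(pvCharAt cs i = '{' ∨ pvCharAt cs i = '[' ∨ pvCharAt cs i = '}' ∨ pvCharAt cs i = ']') := by tauto
              simp only [if_neg hcl, if_neg htk]
              exact ih top pending false esc q (i + 1)

-- ===== VERDICT (by name: the statement is the Claim_ definition above) =====
theorem balanced_slice_py_spec : Claim_equal_balanced_slice_py := by
  intro text start_index _ _
  unfold Spec_balanced_slice_py balanced_slice_py balanced_slice_py_alt
  cases h : PySem.List.pyGet? text.toList start_index with
  | none => simp only [h]
  | some opener =>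
    simp only [h]
    exact pvLoopA_eq_matchB text.toList start_index
      (((text.toList.length : Int) - (start_index + 1)).toNat)
      (if opener = '{' then '}' else ']') [] false false ' ' (start_index + 1)
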